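-- pv_equiv track=rewrite | github.com/jano31415/codejam | codeforces/edu_143/probb.py | solve
-- ===== SOURCE A (Python) =====
-- def solve(n,k,segments):
--     segments = [(li,ri) for li, ri in segments if ri >= k and li <= k]
--     if len(segments) == 0:
--         return "NO"
--     minr = min([ri for li,ri in segments])
--     maxl = max([li for li,ri in segments])
--     if minr == k and maxl == k:
--         return "YES"
--     return "NO"
-- ===== SOURCE B (Python) =====
-- def solve(n, k, segments):
--     has_left = has_right = False
--     for li, ri in segments:
--         if li > k or ri < k:
--             continue
--         if li == k:
--             has_left = True
--         if ri == k:
--             has_right = True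
--     return "YES" if has_left and has_right else "NO"
-- ===== Notes on version B (the rewrite author's own statement) =====
-- stated objective: simpler
-- what changed: Replaces the filter-then-min-then-max three-pass pipeline (which builds an intermediate list) with one pass over the segments maintaining two boolean flags (some containing segment ends at k / starts at k).
import Mathlib
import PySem

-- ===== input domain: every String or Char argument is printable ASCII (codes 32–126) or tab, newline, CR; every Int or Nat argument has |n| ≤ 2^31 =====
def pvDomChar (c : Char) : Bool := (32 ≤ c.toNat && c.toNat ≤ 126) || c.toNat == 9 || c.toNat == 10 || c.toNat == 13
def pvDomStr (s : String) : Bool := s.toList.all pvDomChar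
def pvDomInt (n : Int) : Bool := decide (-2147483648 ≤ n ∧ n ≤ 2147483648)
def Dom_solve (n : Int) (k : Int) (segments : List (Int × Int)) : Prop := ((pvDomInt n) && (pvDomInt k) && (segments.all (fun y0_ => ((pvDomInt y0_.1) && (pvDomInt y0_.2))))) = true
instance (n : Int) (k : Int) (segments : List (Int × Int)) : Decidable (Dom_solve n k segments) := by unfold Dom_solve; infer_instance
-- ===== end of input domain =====

-- B replaces A's filter/min/max three-pass pipeline by a single pass keeping two
-- boolean flags (objective: simpler, same asymptotic cost).

-- ===== PORT A =====
-- filter the containing segments, then min of the right ends, max of the left ends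
def solve (n : Int) (k : Int) (segments : List (Int × Int)) : String :=
  let segs := segments.filter (fun p => decide (p.2 ≥ k) && decide (p.1 ≤ k))
  if segs.length = 0 then "NO"
  else
    match PySem.List.min? (segs.map (fun p => p.2)) (fun x => x),
          PySem.List.max? (segs.map (fun p => p.1)) (fun x => x) with
    | some minr, some maxl => if minr = k ∧ maxl = k then "YES" else "NO"
    | _, _ => "NO"   -- unreachable: segs is nonempty here

-- ===== PORT B =====
-- the loop body of Source B: skip non-containing segments, set the two flags
def solveAltStep (k : Int) (st : Bool × Bool) (p : Int × Int) : Bool × Bool :=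
  if p.1 > k ∨ p.2 < k then st
  else (st.1 || decide (p.1 = k), st.2 || decide (p.2 = k))

def solve_alt (n : Int) (k : Int) (segments : List (Int × Int)) : String :=
  let st := segments.foldl (solveAltStep k) (false, false)
  if st.1 && st.2 then "YES" else "NO"

-- ===== PRECONDITION & SPEC =====
def Spec_solve (n : Int) (k : Int) (segments : List (Int × Int)) (out : String) : Prop := out = solve_alt n k segments
instance (n : Int) (k : Int) (segments : List (Int × Int)) (out : String) : Decidable (Spec_solve n k segments out) := by unfold Spec_solve; infer_instance

-- ===== CLAIM (what is proved, stated in full; the proofs are below) =====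
def Claim_equal_solve : Prop := ∀ (n : Int) (k : Int) (segments : List (Int × Int)), Dom_solve n k segments → Spec_solve n k segments (solve n k segments)

-- ===== LEMMAS AND PROOFS =====

def flagL (k : Int) (p : Int × Int) : Bool := decide (p.1 ≤ k ∧ p.2 ≥ k ∧ p.1 = k)
def flagR (k : Int) (p : Int × Int) : Bool := decide (p.1 ≤ k ∧ p.2 ≥ k ∧ p.2 = k)

theorem fold_flags (k : Int) (l : List (Int × Int)) : ∀ (a b : Bool),
    l.foldl (solveAltStep k) (a, b) = (a || l.any (flagL k), b || l.any (flagR k)) := by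
  induction l with
  | nil => intro a b; simp
  | cons p t ih =>
    intro a b
    simp only [List.foldl_cons, List.any_cons, solveAltStep]
    by_cases h : p.1 > k ∨ p.2 < k
    · rw [if_pos h, ih]
      have hl : flagL k p = false := by simp [flagL]; omega
      have hr : flagR k p = false := by simp [flagR]; omega
      rw [hl, hr]; simp
    · rw [if_neg h, ih]
      rw [not_or, not_lt, not_lt] at h
      have hl : flagL k p = decide (p.1 = k) := by
        unfold flagL; rw [decide_eq_decide]
        constructor
        · rintro ⟨_, _, hx⟩; exact hx
        · intro hx; exact ⟨h.1, h.2, hx⟩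
      have hr : flagR k p = decide (p.2 = k) := by
        unfold flagR; rw [decide_eq_decide]
        constructor
        · rintro ⟨_, _, hx⟩; exact hx
        · intro hx; exact ⟨h.1, h.2, hx⟩
      rw [hl, hr]
      simp [Bool.or_assoc]

theorem min?_eq_iff_mem (k : Int) (l : List Int) (hne : l ≠ [])
    (hall : ∀ x ∈ l, k ≤ x) :
    PySem.List.min? l (fun x => x) = some k ↔ k ∈ l := by
  constructor
  · intro h; exact PySem.List.min?_mem h
  · intro hk
    cases h : PySem.List.min? l (fun x => x) with
    | none => exact absurd ((PySem.List.min?_eq_none_iff _ _).mp h) hne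
    | some m =>
      have h1 := PySem.List.min?_isMin h k hk
      have h2 := hall m (PySem.List.min?_mem h)
      simp only at h1
      congr 1; omega

theorem max?_eq_iff_mem (k : Int) (l : List Int) (hne : l ≠ [])
    (hall : ∀ x ∈ l, x ≤ k) :
    PySem.List.max? l (fun x => x) = some k ↔ k ∈ l := by
  constructor
  · intro h; exact PySem.List.max?_mem h
  · intro hk
    cases h : PySem.List.max? l (fun x => x) with
    | none => exact absurd ((PySem.List.max?_eq_none_iff _ _).mp h) hne
    | some m =>
      have h1 := PySem.List.max?_isMax h k hk
      have h2 := hall m (PySem.List.max?_mem h)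
      simp only at h1
      congr 1; omega

theorem solve_spec : Claim_equal_solve := by
  intro n k segments _
  unfold Spec_solve solve solve_alt
  rw [fold_flags]
  simp only [Bool.false_or]
  set segs := segments.filter (fun p => decide (p.2 ≥ k) && decide (p.1 ≤ k)) with hsegs
  have hmemR : (k ∈ segs.map (fun p => p.2)) ↔ segments.any (flagR k) = true := by
    simp [hsegs, List.mem_map, List.mem_filter, List.any_eq_true, flagR]
  have hmemL : (k ∈ segs.map (fun p => p.1)) ↔ segments.any (flagL k) = true := by
    simp [hsegs, List.mem_map, List.mem_filter, List.any_eq_true, flagL]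
  by_cases hne : segs.length = 0
  · rw [if_pos hne]
    have hnil : segs = [] := List.length_eq_zero_iff.mp hne
    have : segments.any (flagR k) = false := by
      rw [← Bool.not_eq_true]; intro h
      have := hmemR.mpr h; simp [hnil] at this
    rw [this]; simp
  · rw [if_neg hne]
    have hsne : segs ≠ [] := by intro h; exact hne (by simp [h])
    have hallR : ∀ x ∈ segs.map (fun p => p.2), k ≤ x := by
      intro x hx
      simp only [hsegs, List.mem_map, List.mem_filter] at hx
      obtain ⟨p, ⟨_, hp⟩, rfl⟩ := hx
      simp at hp; omega
    have hallL : ∀ x ∈ segs.map (fun p => p.1), x ≤ k := by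
      intro x hx
      simp only [hsegs, List.mem_map, List.mem_filter] at hx
      obtain ⟨p, ⟨_, hp⟩, rfl⟩ := hx
      simp at hp; omega
    have hRne : segs.map (fun p => p.2) ≠ [] := by simp [hsne]
    have hLne : segs.map (fun p => p.1) ≠ [] := by simp [hsne]
    cases hmin : PySem.List.min? (segs.map (fun p => p.2)) (fun x => x) with
    | none => exact absurd ((PySem.List.min?_eq_none_iff _ _).mp hmin) hRne
    | some minr =>
      cases hmax : PySem.List.max? (segs.map (fun p => p.1)) (fun x => x) with
      | none => exact absurd ((PySem.List.max?_eq_none_iff _ _).mp hmax) hLne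
      | some maxl =>
        show (if minr = k ∧ maxl = k then "YES" else "NO") = _
        by_cases hyes : minr = k ∧ maxl = k
        · rw [if_pos hyes]
          have h1 : segments.any (flagR k) = true :=
            hmemR.mp ((min?_eq_iff_mem k _ hRne hallR).mp (hyes.1 ▸ hmin))
          have h2 : segments.any (flagL k) = true :=
            hmemL.mp ((max?_eq_iff_mem k _ hLne hallL).mp (hyes.2 ▸ hmax))
          rw [h1, h2]; simp
        · rw [if_neg hyes]
          rcases Decidable.not_and_iff_not_or_not.mp hyes with h | h
          · have : segments.any (flagR k) = false := by
              rw [← Bool.not_eq_true]; intro hc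
              exact h (by
                have := (min?_eq_iff_mem k _ hRne hallR).mpr (hmemR.mpr hc)
                rw [hmin] at this; exact Option.some_inj.mp this)
            rw [this]; simp
          · have : segments.any (flagL k) = false := by
              rw [← Bool.not_eq_true]; intro hc
              exact h (by
                have := (max?_eq_iff_mem k _ hLne hallL).mpr (hmemL.mpr hc)
                rw [hmax] at this; exact Option.some_inj.mp this)
            rw [this]; simp
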